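-- pv_equiv track=rewrite | github.com/QI-Zzz/CS61A | hog/hog.py | free_bacon
-- ===== SOURCE A (Python) =====
-- FIRST_101_DIGITS_OF_PI = 31415926535897932384626433832795028841971693993751058209749445923078164062862089986280348253421170679
--
-- def free_bacon(score):
--     """Return the points scored from rolling 0 dice (Free Bacon).
--
--     score:  The opponent's current score.
--     """
--     assert score < 100, 'The game should be over.'
--     pi = FIRST_101_DIGITS_OF_PI
--
--     # Trim pi to only (score + 1) digit(s)
--     # BEGIN PROBLEM 2
--     "*** YOUR CODE HERE ***"
--     if score == 0:
--         return 6
--     while pi >= pow(10, score + 1):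
--         pi = pi // 10
--     return pi % 10 + 3
-- ===== SOURCE B (Python) =====
-- FIRST_101_DIGITS_OF_PI = 31415926535897932384626433832795028841971693993751058209749445923078164062862089986280348253421170679
--
-- def free_bacon(score):
--     """Return the points scored from rolling 0 dice (Free Bacon)."""
--     assert score < 100, 'The game should be over.'
--     return FIRST_101_DIGITS_OF_PI // 10 ** (100 - score) % 10 + 3
-- ===== Notes on version B (the rewrite author's own statement) =====
-- stated objective: simpler
-- what changed: Replaced the trim-pi-by-repeated-division loop and the score==0 special case with one direct floor division of the pi constant by 10**(100-score), reading the digit in a single step.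
-- outside the precondition, e.g. on free_bacon(100): A raises AssertionError, B raises AssertionError; on free_bacon(-325): A does not finish within the time limit, B returns 3
import Mathlib
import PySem

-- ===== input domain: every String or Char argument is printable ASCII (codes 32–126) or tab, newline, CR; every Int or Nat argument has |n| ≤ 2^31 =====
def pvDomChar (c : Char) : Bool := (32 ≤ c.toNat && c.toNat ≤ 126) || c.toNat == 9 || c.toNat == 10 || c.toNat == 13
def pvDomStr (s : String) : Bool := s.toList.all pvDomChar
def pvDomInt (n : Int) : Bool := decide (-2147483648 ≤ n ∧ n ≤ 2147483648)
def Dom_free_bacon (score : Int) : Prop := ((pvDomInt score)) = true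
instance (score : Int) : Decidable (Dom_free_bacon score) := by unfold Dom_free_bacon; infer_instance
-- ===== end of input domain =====

-- B replaces A's trim-the-digits division loop (and the score==0 special case) by one
-- direct floor division by a power of ten; objective: simpler.


-- ===== PORT A =====
-- A's `while pi >= pow(10, score+1): pi //= 10`.  Fuel 200 only makes the recursion
-- structural; pi is a 101-digit number, so the loop runs at most 101 times under Pre_.
def freeBaconLoop : Nat → Nat → Nat → Nat
  | 0, _, pi => pi
  | f + 1, b, pi => if b ≤ pi then freeBaconLoop f b (pi / 10) else pi

def FIRST_101_DIGITS_OF_PI : Nat := 31415926535897932384626433832795028841971693993751058209749445923078164062862089986280348253421170679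

def free_bacon (score : Int) : Int :=
  -- assert score < 100: Pre_ excludes score ≥ 100 (AssertionError)
  if score = 0 then 6
  else
    -- Python's pow(10, score+1) is an exact Nat power for score+1 ≥ 0; for
    -- -323 ≤ score+1 < 0 it is a float in (0,1), so for the nonnegative integer pi
    -- the comparison `pi >= pow(10, score+1)` is exactly `pi ≥ 1`.  (For
    -- score+1 ≤ -324 the float underflows to 0.0 and A loops forever; Pre_ excludes that.)
    let b : Nat := if 0 ≤ score + 1 then 10 ^ (score + 1).toNat else 1
    (↑(freeBaconLoop 200 b FIRST_101_DIGITS_OF_PI) : Int) % 10 + 3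

-- ===== PORT B =====
def free_bacon_alt (score : Int) : Int :=
  -- assert score < 100: Pre_ excludes score ≥ 100
  -- FIRST // 10 ** (100 - score) % 10 + 3   (100 - score ≥ 1 under Pre_)
  PySem.Int.mod (PySem.Int.floordiv (↑FIRST_101_DIGITS_OF_PI) (10 ^ (100 - score).toNat)) 10 + 3

-- ===== PRECONDITION & SPEC =====
-- Pre_ excludes score ≥ 100, where A's assert raises AssertionError, and score ≤ -325,
-- where A never returns (pow(10, score+1) underflows to float 0.0, so the while loop
-- spins forever on pi = 0).
def Pre_free_bacon (score : Int) : Prop := -324 ≤ score ∧ score < 100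
instance (score : Int) : Decidable (Pre_free_bacon score) := by unfold Pre_free_bacon; infer_instance
def pvWitness_free_bacon : Int := 0

def Spec_free_bacon (score : Int) (out : Int) : Prop := out = free_bacon_alt score
instance (score : Int) (out : Int) : Decidable (Spec_free_bacon score out) := by unfold Spec_free_bacon; infer_instance

-- ===== CLAIM (what is proved, stated in full; the proofs are below) =====
def Claim_equal_free_bacon : Prop := ∀ (score : Int), Dom_free_bacon score → Pre_free_bacon score → Spec_free_bacon score (free_bacon score)

-- ===== LEMMAS AND PROOFS =====
-- The whole admitted domain is the finite set {-324, …, 99}; check it exhaustively.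
set_option maxRecDepth 100000 in
theorem free_bacon_all :
    (List.range 424).all
      (fun t => free_bacon ((t : Int) - 324) == free_bacon_alt ((t : Int) - 324)) = true := by
  decide

-- ===== VERDICT (by name: the statement is the Claim_ definition above) =====
theorem free_bacon_spec : Claim_equal_free_bacon := by
  intro score _ hpre
  obtain ⟨h1, h2⟩ := hpre
  unfold Spec_free_bacon
  have hall := free_bacon_all
  rw [List.all_eq_true] at hall
  have ht : (score + 324).toNat ∈ List.range 424 := by
    rw [List.mem_range]; omega
  have := hall _ ht
  rw [beq_iff_eq] at this
  have he : ((score + 324).toNat : Int) - 324 = score := by omega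
  rwa [he] at this
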